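-- pv_equiv track=rewrite | github.com/davidvrchen/Probability | utils/AminoAcids.py | get_acid
-- ===== SOURCE A (Python) =====
-- AMINO_ACIDS = [
--     {'code': "A", 'bases': ["GCX"], 'p': 0.0777},
--     {'code': "C", 'bases': ["TGT", "TGC"], 'p': 0.0157},
--     {'code': "D", 'bases': ["GAT", "GAC"], 'p': 0.053},
--     {'code': "E", 'bases': ["GAA", "GAG"], 'p': 0.0656},
--     {'code': "F", 'bases': ["TTX"], 'p': 0.0405},
--     {'code': "G", 'bases': ["GGX"], 'p': 0.0691},
--     {'code': "H", 'bases': ["CAT", "CAC"], 'p': 0.0227},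
--     {'code': "I", 'bases': ["ATT", "ATC", "ATA"], 'p': 0.0591},
--     {'code': "K", 'bases': ["AAA", "AAG"], 'p': 0.0595},
--     {'code': "L", 'bases': ["CTX"], 'p': 0.096},
--     {'code': "M", 'bases': ["ATG"], 'p': 0.0238},
--     {'code': "N", 'bases': ["AAT", "AAC"], 'p': 0.0427},
--     {'code': "P", 'bases': ["CCX"], 'p': 0.0469},
--     {'code': "Q", 'bases': ["CAA", "CAG"], 'p': 0.0393},
--     {'code': "R", 'bases': ["CGX", "AGA", "AGG"], 'p': 0.0526},
--     {'code': "S", 'bases': ["TCX", "AGT", "AGC"], 'p': 0.0694},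
--     {'code': "T", 'bases': ["ACX"], 'p': 0.055},
--     {'code': "V", 'bases': ["GTX"], 'p': 0.0667},
--     {'code': "W", 'bases': ["TGG"], 'p': 0.0118},
--     {'code': "Y", 'bases': ["TAT", "TAC"], 'p': 0.0311},
-- ]
--
-- def get_acid(base):
--     for acid in AMINO_ACIDS:
--         for code in acid['bases']:
--             if base == code:
--                 return acid['code']
--             if code[2] == 'X':
--                 if base[0:2] == code[0:2]:
--                     return acid['code']
--     return None
-- ===== SOURCE B (Python) =====
-- # Precomputed codon table: exact codons and wildcard two-letter prefixes map
-- # straight to the amino-acid code; get_acid becomes two dict lookups.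
-- # (Exact-codon keys and wildcard-prefix keys can never collide: no wildcard
-- # prefix equals the first two letters of any exact codon.)
-- CODON_TABLE = {
--     'GC': 'A', 'TGT': 'C', 'TGC': 'C', 'GAT': 'D', 'GAC': 'D', 'GAA': 'E',
--     'GAG': 'E', 'TT': 'F', 'GG': 'G', 'CAT': 'H', 'CAC': 'H', 'ATT': 'I',
--     'ATC': 'I', 'ATA': 'I', 'AAA': 'K', 'AAG': 'K', 'CT': 'L', 'ATG': 'M',
--     'AAT': 'N', 'AAC': 'N', 'CC': 'P', 'CAA': 'Q', 'CAG': 'Q', 'CG': 'R',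
--     'AGA': 'R', 'AGG': 'R', 'TC': 'S', 'AGT': 'S', 'AGC': 'S', 'AC': 'T',
--     'GT': 'V', 'TGG': 'W', 'TAT': 'Y', 'TAC': 'Y',
-- }
--
-- def get_acid(base):
--     # values are non-empty strings, so `or` means "fall back on None"
--     return CODON_TABLE.get(base) or CODON_TABLE.get(base[0:2])
-- ===== Notes on version B (the rewrite author's own statement) =====
-- stated objective: idiomatic
-- what changed: Replaces the nested scan over AMINO_ACIDS (with per-code wildcard tests) by a dict precomputed once that keys exact codons and wildcard two-letter prefixes, so get_acid is just two dict lookups.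
import Mathlib
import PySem

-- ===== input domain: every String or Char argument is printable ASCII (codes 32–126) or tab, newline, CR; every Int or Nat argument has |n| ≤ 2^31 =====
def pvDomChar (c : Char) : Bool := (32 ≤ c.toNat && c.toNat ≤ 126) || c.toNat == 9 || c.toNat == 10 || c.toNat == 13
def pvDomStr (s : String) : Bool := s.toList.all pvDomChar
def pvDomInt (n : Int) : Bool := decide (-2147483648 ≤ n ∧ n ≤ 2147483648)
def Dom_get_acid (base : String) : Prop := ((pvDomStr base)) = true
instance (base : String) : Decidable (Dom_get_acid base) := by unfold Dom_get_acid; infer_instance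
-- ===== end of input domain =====

-- B replaces A's nested scan of the amino-acid table by a single precomputed
-- dict (exact codons and wildcard two-letter prefixes as keys) with two lookups.

-- ===== PORT A =====
-- Each AMINO_ACIDS entry is modelled as (code, bases); the 'p' field is a float
-- that get_acid never reads, so it is omitted.
def AMINO_ACIDS : List (String × List String) := [
  ("A", ["GCX"]),
  ("C", ["TGT", "TGC"]),
  ("D", ["GAT", "GAC"]),
  ("E", ["GAA", "GAG"]),
  ("F", ["TTX"]),
  ("G", ["GGX"]),
  ("H", ["CAT", "CAC"]),
  ("I", ["ATT", "ATC", "ATA"]),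
  ("K", ["AAA", "AAG"]),
  ("L", ["CTX"]),
  ("M", ["ATG"]),
  ("N", ["AAT", "AAC"]),
  ("P", ["CCX"]),
  ("Q", ["CAA", "CAG"]),
  ("R", ["CGX", "AGA", "AGG"]),
  ("S", ["TCX", "AGT", "AGC"]),
  ("T", ["ACX"]),
  ("V", ["GTX"]),
  ("W", ["TGG"]),
  ("Y", ["TAT", "TAC"])]

-- inner loop: for code in acid['bases']. Every code constant has length 3, so
-- Python's code[2] never raises; it is ported exactly as PySem.Str.pyGet? c 2 = some 'X'.
def pvScanCodes (base : String) (acidCode : String) : List String → Option String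
  | [] => none
  | c :: cs =>
    if base = c then some acidCode
    else if PySem.Str.pyGet? c 2 = some 'X' then
      if PySem.Str.slice base (some 0) (some 2) = PySem.Str.slice c (some 0) (some 2) then some acidCode
      else pvScanCodes base acidCode cs
    else pvScanCodes base acidCode cs

-- outer loop: for acid in AMINO_ACIDS
def pvScanAcids (base : String) : List (String × List String) → Option String
  | [] => none
  | (code, bases) :: rest =>
    match pvScanCodes base code bases with
    | some r => some r
    | none => pvScanAcids base rest

def get_acid (base : String) : Option String := pvScanAcids base AMINO_ACIDS

-- ===== PORT B =====
-- the literal dict CODON_TABLE from Source B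
def CODON_TABLE : PySem.Dict String String := PySem.Dict.ofList [
  ("GC", "A"),
  ("TGT", "C"),
  ("TGC", "C"),
  ("GAT", "D"),
  ("GAC", "D"),
  ("GAA", "E"),
  ("GAG", "E"),
  ("TT", "F"),
  ("GG", "G"),
  ("CAT", "H"),
  ("CAC", "H"),
  ("ATT", "I"),
  ("ATC", "I"),
  ("ATA", "I"),
  ("AAA", "K"),
  ("AAG", "K"),
  ("CT", "L"),
  ("ATG", "M"),
  ("AAT", "N"),
  ("AAC", "N"),
  ("CC", "P"),
  ("CAA", "Q"),
  ("CAG", "Q"),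
  ("CG", "R"),
  ("AGA", "R"),
  ("AGG", "R"),
  ("TC", "S"),
  ("AGT", "S"),
  ("AGC", "S"),
  ("AC", "T"),
  ("GT", "V"),
  ("TGG", "W"),
  ("TAT", "Y"),
  ("TAC", "Y")]

-- Source B: CODON_TABLE.get(base) or CODON_TABLE.get(base[0:2]); all stored values
-- are non-empty (truthy) strings, so `or` falls through exactly on None.
def get_acid_alt (base : String) : Option String :=
  match CODON_TABLE.get? base with
  | some v => some v
  | none => CODON_TABLE.get? (PySem.Str.slice base (some 0) (some 2))

-- ===== PRECONDITION & SPEC =====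
def Spec_get_acid (base : String) (out : Option String) : Prop := out = get_acid_alt base
instance (base : String) (out : Option String) : Decidable (Spec_get_acid base out) := by unfold Spec_get_acid; infer_instance

-- ===== CLAIM (what is proved, stated in full; the proofs are below) =====
def Claim_equal_get_acid : Prop := ∀ (base : String), Dom_get_acid base → Spec_get_acid base (get_acid base)

-- ===== LEMMAS AND PROOFS =====

lemma pv_slice02 (base : String) : (PySem.Str.slice base (some 0) (some 2)).toList = base.toList.take 2 := by
  simp [pysem]

-- base[0:2] has length ≤ 2, so it can never equal a three-letter codon key
lemma pv_slice02_ne (base t : String) (ht : 3 ≤ t.toList.length) :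
    PySem.Str.slice base (some 0) (some 2) ≠ t := by
  intro h
  have hl := congrArg (fun s : String => s.toList.length) h
  simp only [pv_slice02] at hl
  have h2 : (base.toList.take 2).length ≤ 2 := by simp
  omega

-- the keys of CODON_TABLE are pairwise distinct, so ofList builds the literal dict
lemma pv_tableLit : CODON_TABLE = PySem.Dict.mk [
  ("GC", "A"),
  ("TGT", "C"),
  ("TGC", "C"),
  ("GAT", "D"),
  ("GAC", "D"),
  ("GAA", "E"),
  ("GAG", "E"),
  ("TT", "F"),
  ("GG", "G"),
  ("CAT", "H"),
  ("CAC", "H"),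
  ("ATT", "I"),
  ("ATC", "I"),
  ("ATA", "I"),
  ("AAA", "K"),
  ("AAG", "K"),
  ("CT", "L"),
  ("ATG", "M"),
  ("AAT", "N"),
  ("AAC", "N"),
  ("CC", "P"),
  ("CAA", "Q"),
  ("CAG", "Q"),
  ("CG", "R"),
  ("AGA", "R"),
  ("AGG", "R"),
  ("TC", "S"),
  ("AGT", "S"),
  ("AGC", "S"),
  ("AC", "T"),
  ("GT", "V"),
  ("TGG", "W"),
  ("TAT", "Y"),
  ("TAC", "Y")] := by decide

-- ===== VERDICT (by name: the statement is the Claim_ definition above) =====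
set_option maxRecDepth 4000 in
set_option maxHeartbeats 2000000 in
theorem get_acid_spec : Claim_equal_get_acid := by
  intro base _hdom
  unfold Spec_get_acid
  by_cases hb0 : base = "GCX"
  · subst hb0; decide
  by_cases hb1 : base = "TGT"
  · subst hb1; decide
  by_cases hb2 : base = "TGC"
  · subst hb2; decide
  by_cases hb3 : base = "GAT"
  · subst hb3; decide
  by_cases hb4 : base = "GAC"
  · subst hb4; decide
  by_cases hb5 : base = "GAA"
  · subst hb5; decide
  by_cases hb6 : base = "GAG"
  · subst hb6; decide
  by_cases hb7 : base = "TTX"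
  · subst hb7; decide
  by_cases hb8 : base = "GGX"
  · subst hb8; decide
  by_cases hb9 : base = "CAT"
  · subst hb9; decide
  by_cases hb10 : base = "CAC"
  · subst hb10; decide
  by_cases hb11 : base = "ATT"
  · subst hb11; decide
  by_cases hb12 : base = "ATC"
  · subst hb12; decide
  by_cases hb13 : base = "ATA"
  · subst hb13; decide
  by_cases hb14 : base = "AAA"
  · subst hb14; decide
  by_cases hb15 : base = "AAG"
  · subst hb15; decide
  by_cases hb16 : base = "CTX"
  · subst hb16; decide
  by_cases hb17 : base = "ATG"
  · subst hb17; decide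
  by_cases hb18 : base = "AAT"
  · subst hb18; decide
  by_cases hb19 : base = "AAC"
  · subst hb19; decide
  by_cases hb20 : base = "CCX"
  · subst hb20; decide
  by_cases hb21 : base = "CAA"
  · subst hb21; decide
  by_cases hb22 : base = "CAG"
  · subst hb22; decide
  by_cases hb23 : base = "CGX"
  · subst hb23; decide
  by_cases hb24 : base = "AGA"
  · subst hb24; decide
  by_cases hb25 : base = "AGG"
  · subst hb25; decide
  by_cases hb26 : base = "TCX"
  · subst hb26; decide
  by_cases hb27 : base = "AGT"
  · subst hb27; decide
  by_cases hb28 : base = "AGC"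
  · subst hb28; decide
  by_cases hb29 : base = "ACX"
  · subst hb29; decide
  by_cases hb30 : base = "GTX"
  · subst hb30; decide
  by_cases hb31 : base = "TGG"
  · subst hb31; decide
  by_cases hb32 : base = "TAT"
  · subst hb32; decide
  by_cases hb33 : base = "TAC"
  · subst hb33; decide
  by_cases hb34 : base = "GC"
  · subst hb34; decide
  by_cases hb35 : base = "TT"
  · subst hb35; decide
  by_cases hb36 : base = "GG"
  · subst hb36; decide
  by_cases hb37 : base = "CT"
  · subst hb37; decide
  by_cases hb38 : base = "CC"
  · subst hb38; decide
  by_cases hb39 : base = "CG"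
  · subst hb39; decide
  by_cases hb40 : base = "TC"
  · subst hb40; decide
  by_cases hb41 : base = "AC"
  · subst hb41; decide
  by_cases hb42 : base = "GT"
  · subst hb42; decide
  have hget : CODON_TABLE.get? base = none := by
    rw [PySem.Dict.get?_eq_none_iff_not_mem_keys]
    simp [pv_tableLit, PySem.Dict.keys, hb1, hb2, hb3, hb4, hb5, hb6, hb9, hb10, hb11, hb12, hb13, hb14, hb15, hb17, hb18, hb19, hb21, hb22, hb24, hb25, hb27, hb28, hb31, hb32, hb33, hb34, hb35, hb36, hb37, hb38, hb39, hb40, hb41, hb42]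
  by_cases hp0 : PySem.Str.slice base (some 0) (some 2) = "GC"
  · have hB : get_acid_alt base = some "A" := by
      unfold get_acid_alt; rw [hget, hp0, pv_tableLit]; decide
    rw [hB]
    simp [get_acid, pvScanAcids, pvScanCodes, AMINO_ACIDS, hp0,
      (by decide : PySem.Str.slice "GCX" (some 0) (some 2) = "GC"),
      ]
  by_cases hp1 : PySem.Str.slice base (some 0) (some 2) = "TT"
  · have hB : get_acid_alt base = some "F" := by
      unfold get_acid_alt; rw [hget, hp1, pv_tableLit]; decide
    rw [hB]
    simp [get_acid, pvScanAcids, pvScanCodes, AMINO_ACIDS, hp1,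
      (by decide : PySem.Str.slice "GCX" (some 0) (some 2) = "GC"),
      (by decide : PySem.Str.slice "TTX" (some 0) (some 2) = "TT"),
      hb0, hb1, hb2, hb3, hb4, hb5, hb6]
  by_cases hp2 : PySem.Str.slice base (some 0) (some 2) = "GG"
  · have hB : get_acid_alt base = some "G" := by
      unfold get_acid_alt; rw [hget, hp2, pv_tableLit]; decide
    rw [hB]
    simp [get_acid, pvScanAcids, pvScanCodes, AMINO_ACIDS, hp2,
      (by decide : PySem.Str.slice "GCX" (some 0) (some 2) = "GC"),
      (by decide : PySem.Str.slice "TTX" (some 0) (some 2) = "TT"),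
      (by decide : PySem.Str.slice "GGX" (some 0) (some 2) = "GG"),
      hb0, hb1, hb2, hb3, hb4, hb5, hb6, hb7]
  by_cases hp3 : PySem.Str.slice base (some 0) (some 2) = "CT"
  · have hB : get_acid_alt base = some "L" := by
      unfold get_acid_alt; rw [hget, hp3, pv_tableLit]; decide
    rw [hB]
    simp [get_acid, pvScanAcids, pvScanCodes, AMINO_ACIDS, hp3,
      (by decide : PySem.Str.slice "GCX" (some 0) (some 2) = "GC"),
      (by decide : PySem.Str.slice "TTX" (some 0) (some 2) = "TT"),
      (by decide : PySem.Str.slice "GGX" (some 0) (some 2) = "GG"),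
      (by decide : PySem.Str.slice "CTX" (some 0) (some 2) = "CT"),
      hb0, hb1, hb2, hb3, hb4, hb5, hb6, hb7, hb8, hb9, hb10, hb11, hb12, hb13, hb14, hb15]
  by_cases hp4 : PySem.Str.slice base (some 0) (some 2) = "CC"
  · have hB : get_acid_alt base = some "P" := by
      unfold get_acid_alt; rw [hget, hp4, pv_tableLit]; decide
    rw [hB]
    simp [get_acid, pvScanAcids, pvScanCodes, AMINO_ACIDS, hp4,
      (by decide : PySem.Str.slice "GCX" (some 0) (some 2) = "GC"),
      (by decide : PySem.Str.slice "TTX" (some 0) (some 2) = "TT"),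
      (by decide : PySem.Str.slice "GGX" (some 0) (some 2) = "GG"),
      (by decide : PySem.Str.slice "CTX" (some 0) (some 2) = "CT"),
      (by decide : PySem.Str.slice "CCX" (some 0) (some 2) = "CC"),
      hb0, hb1, hb2, hb3, hb4, hb5, hb6, hb7, hb8, hb9, hb10, hb11, hb12, hb13, hb14, hb15, hb16, hb17, hb18, hb19]
  by_cases hp5 : PySem.Str.slice base (some 0) (some 2) = "CG"
  · have hB : get_acid_alt base = some "R" := by
      unfold get_acid_alt; rw [hget, hp5, pv_tableLit]; decide
    rw [hB]
    simp [get_acid, pvScanAcids, pvScanCodes, AMINO_ACIDS, hp5,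
      (by decide : PySem.Str.slice "GCX" (some 0) (some 2) = "GC"),
      (by decide : PySem.Str.slice "TTX" (some 0) (some 2) = "TT"),
      (by decide : PySem.Str.slice "GGX" (some 0) (some 2) = "GG"),
      (by decide : PySem.Str.slice "CTX" (some 0) (some 2) = "CT"),
      (by decide : PySem.Str.slice "CCX" (some 0) (some 2) = "CC"),
      (by decide : PySem.Str.slice "CGX" (some 0) (some 2) = "CG"),
      hb0, hb1, hb2, hb3, hb4, hb5, hb6, hb7, hb8, hb9, hb10, hb11, hb12, hb13, hb14, hb15, hb16, hb17, hb18, hb19, hb20, hb21, hb22]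
  by_cases hp6 : PySem.Str.slice base (some 0) (some 2) = "TC"
  · have hB : get_acid_alt base = some "S" := by
      unfold get_acid_alt; rw [hget, hp6, pv_tableLit]; decide
    rw [hB]
    simp [get_acid, pvScanAcids, pvScanCodes, AMINO_ACIDS, hp6,
      (by decide : PySem.Str.slice "GCX" (some 0) (some 2) = "GC"),
      (by decide : PySem.Str.slice "TTX" (some 0) (some 2) = "TT"),
      (by decide : PySem.Str.slice "GGX" (some 0) (some 2) = "GG"),
      (by decide : PySem.Str.slice "CTX" (some 0) (some 2) = "CT"),
      (by decide : PySem.Str.slice "CCX" (some 0) (some 2) = "CC"),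
      (by decide : PySem.Str.slice "CGX" (some 0) (some 2) = "CG"),
      (by decide : PySem.Str.slice "TCX" (some 0) (some 2) = "TC"),
      hb0, hb1, hb2, hb3, hb4, hb5, hb6, hb7, hb8, hb9, hb10, hb11, hb12, hb13, hb14, hb15, hb16, hb17, hb18, hb19, hb20, hb21, hb22, hb23, hb24, hb25]
  by_cases hp7 : PySem.Str.slice base (some 0) (some 2) = "AC"
  · have hB : get_acid_alt base = some "T" := by
      unfold get_acid_alt; rw [hget, hp7, pv_tableLit]; decide
    rw [hB]
    simp [get_acid, pvScanAcids, pvScanCodes, AMINO_ACIDS, hp7,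
      (by decide : PySem.Str.slice "GCX" (some 0) (some 2) = "GC"),
      (by decide : PySem.Str.slice "TTX" (some 0) (some 2) = "TT"),
      (by decide : PySem.Str.slice "GGX" (some 0) (some 2) = "GG"),
      (by decide : PySem.Str.slice "CTX" (some 0) (some 2) = "CT"),
      (by decide : PySem.Str.slice "CCX" (some 0) (some 2) = "CC"),
      (by decide : PySem.Str.slice "CGX" (some 0) (some 2) = "CG"),
      (by decide : PySem.Str.slice "TCX" (some 0) (some 2) = "TC"),
      (by decide : PySem.Str.slice "ACX" (some 0) (some 2) = "AC"),
      hb0, hb1, hb2, hb3, hb4, hb5, hb6, hb7, hb8, hb9, hb10, hb11, hb12, hb13, hb14, hb15, hb16, hb17, hb18, hb19, hb20, hb21, hb22, hb23, hb24, hb25, hb26, hb27, hb28]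
  by_cases hp8 : PySem.Str.slice base (some 0) (some 2) = "GT"
  · have hB : get_acid_alt base = some "V" := by
      unfold get_acid_alt; rw [hget, hp8, pv_tableLit]; decide
    rw [hB]
    simp [get_acid, pvScanAcids, pvScanCodes, AMINO_ACIDS, hp8,
      (by decide : PySem.Str.slice "GCX" (some 0) (some 2) = "GC"),
      (by decide : PySem.Str.slice "TTX" (some 0) (some 2) = "TT"),
      (by decide : PySem.Str.slice "GGX" (some 0) (some 2) = "GG"),
      (by decide : PySem.Str.slice "CTX" (some 0) (some 2) = "CT"),
      (by decide : PySem.Str.slice "CCX" (some 0) (some 2) = "CC"),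
      (by decide : PySem.Str.slice "CGX" (some 0) (some 2) = "CG"),
      (by decide : PySem.Str.slice "TCX" (some 0) (some 2) = "TC"),
      (by decide : PySem.Str.slice "ACX" (some 0) (some 2) = "AC"),
      (by decide : PySem.Str.slice "GTX" (some 0) (some 2) = "GT"),
      hb0, hb1, hb2, hb3, hb4, hb5, hb6, hb7, hb8, hb9, hb10, hb11, hb12, hb13, hb14, hb15, hb16, hb17, hb18, hb19, hb20, hb21, hb22, hb23, hb24, hb25, hb26, hb27, hb28, hb29]
  have hslice : CODON_TABLE.get? (PySem.Str.slice base (some 0) (some 2)) = none := by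
    rw [PySem.Dict.get?_eq_none_iff_not_mem_keys]
    simp [pv_tableLit, PySem.Dict.keys, hp0, hp1, hp2, hp3, hp4, hp5, hp6, hp7, hp8,
      pv_slice02_ne base "TGT" (by decide),
      pv_slice02_ne base "TGC" (by decide),
      pv_slice02_ne base "GAT" (by decide),
      pv_slice02_ne base "GAC" (by decide),
      pv_slice02_ne base "GAA" (by decide),
      pv_slice02_ne base "GAG" (by decide),
      pv_slice02_ne base "CAT" (by decide),
      pv_slice02_ne base "CAC" (by decide),
      pv_slice02_ne base "ATT" (by decide),
      pv_slice02_ne base "ATC" (by decide),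
      pv_slice02_ne base "ATA" (by decide),
      pv_slice02_ne base "AAA" (by decide),
      pv_slice02_ne base "AAG" (by decide),
      pv_slice02_ne base "ATG" (by decide),
      pv_slice02_ne base "AAT" (by decide),
      pv_slice02_ne base "AAC" (by decide),
      pv_slice02_ne base "CAA" (by decide),
      pv_slice02_ne base "CAG" (by decide),
      pv_slice02_ne base "AGA" (by decide),
      pv_slice02_ne base "AGG" (by decide),
      pv_slice02_ne base "AGT" (by decide),
      pv_slice02_ne base "AGC" (by decide),
      pv_slice02_ne base "TGG" (by decide),
      pv_slice02_ne base "TAT" (by decide),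
      pv_slice02_ne base "TAC" (by decide)]
  have hB : get_acid_alt base = none := by
    unfold get_acid_alt; rw [hget]; exact hslice
  rw [hB]
  simp [get_acid, pvScanAcids, pvScanCodes, AMINO_ACIDS,
      (by decide : PySem.Str.slice "GCX" (some 0) (some 2) = "GC"),
      (by decide : PySem.Str.slice "TTX" (some 0) (some 2) = "TT"),
      (by decide : PySem.Str.slice "GGX" (some 0) (some 2) = "GG"),
      (by decide : PySem.Str.slice "CTX" (some 0) (some 2) = "CT"),
      (by decide : PySem.Str.slice "CCX" (some 0) (some 2) = "CC"),
      (by decide : PySem.Str.slice "CGX" (some 0) (some 2) = "CG"),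
      (by decide : PySem.Str.slice "TCX" (some 0) (some 2) = "TC"),
      (by decide : PySem.Str.slice "ACX" (some 0) (some 2) = "AC"),
      (by decide : PySem.Str.slice "GTX" (some 0) (some 2) = "GT"),
      hb0, hb1, hb2, hb3, hb4, hb5, hb6, hb7, hb8, hb9, hb10, hb11, hb12, hb13, hb14, hb15, hb16, hb17, hb18, hb19, hb20, hb21, hb22, hb23, hb24, hb25, hb26, hb27, hb28, hb29, hb30, hb31, hb32, hb33, hp0, hp1, hp2, hp3, hp4, hp5, hp6, hp7, hp8]
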